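-- pv_equiv track=rewrite | github.com/evelynnn04/postgreysiaSQL | QueryOptimizer/QueryParser.py | extract_FROM
-- ===== SOURCE A (Python) =====
-- def extract_FROM(values: str):
--     arr_joins = []
--     values_parsed = values.split()
--     element = ""
--     i = 0
--     while i < len(values_parsed):
--         if values_parsed[i] == "NATURAL" and values_parsed[i+1] == "JOIN":
--             if element:
--                 arr_joins.append(element.strip())
--             arr_joins.append("NATURAL JOIN")
--             element = ""
--             i+=2
--             continue
--         elif values_parsed[i] in ["JOIN",","]:
--             if element:
--                 arr_joins.append(element.strip())
--             arr_joins.append(values_parsed[i])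
--             element = ""
--         else:
--             element += " " + values_parsed[i]
--         i += 1
--
--     if element:
--         arr_joins.append(element.strip())
--
--     return arr_joins
-- ===== SOURCE B (Python) =====
-- def extract_FROM(values: str):
--     # Pass 1: normalize into tokens, fusing NATURAL + JOIN into one token.
--     words = values.split()
--     tokens = []
--     j = 0
--     while j < len(words):
--         if words[j] == "NATURAL" and j + 1 < len(words) and words[j + 1] == "JOIN":
--             tokens.append("NATURAL JOIN")
--             j += 2
--         else:
--             tokens.append(words[j])
--             j += 1
--     # Pass 2: split the token stream on delimiters.
--     result = []
--     current = []
--     for t in tokens: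
--         if t in ("JOIN", ",", "NATURAL JOIN"):
--             if current:
--                 result.append(" ".join(current))
--             result.append(t)
--             current = []
--         else:
--             current.append(t)
--     if current:
--         result.append(" ".join(current))
--     return result
-- ===== Notes on version B (the rewrite author's own statement) =====
-- stated objective: alternative
-- what changed: Replaces A's single interleaved index-walking scan (accumulating a space-prefixed string that is flushed with strip) by a two-pass normalize-then-split decomposition: first fuse NATURAL+JOIN into one token, then split the token stream on delimiter tokens, space-joining each group of kept tokens.
-- outside the precondition, e.g. on extract_FROM('NATURAL'): A raises IndexError, B returns ['NATURAL']
import Mathlib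
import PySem

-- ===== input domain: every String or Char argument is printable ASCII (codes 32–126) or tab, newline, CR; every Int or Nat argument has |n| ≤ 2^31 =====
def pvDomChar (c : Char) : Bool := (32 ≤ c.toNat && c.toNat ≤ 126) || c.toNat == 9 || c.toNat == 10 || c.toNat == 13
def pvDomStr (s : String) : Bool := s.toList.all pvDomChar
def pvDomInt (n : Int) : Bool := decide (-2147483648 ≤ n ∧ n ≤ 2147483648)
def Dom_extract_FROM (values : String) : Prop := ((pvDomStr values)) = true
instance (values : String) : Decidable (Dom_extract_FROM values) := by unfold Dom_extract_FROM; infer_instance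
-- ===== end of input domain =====

-- B replaces A's interleaved index-walking scan by a normalize-then-split decomposition
-- (fuse NATURAL+JOIN into one token, then split the token stream on delimiters); objective: alternative.

-- ===== PORT A =====
-- literal port of A's while-loop over the whitespace-split words; the `acc` returned when
-- the remaining list is exactly ["NATURAL"] is the point where the Python raises IndexError
-- (those inputs are excluded by Pre_extract_FROM).
def extract_FROM_loop : List String → List String → String → List String
  | [], acc, element =>
      if element == "" then acc else acc ++ [PySem.Str.strip element]
  | [w], acc, element =>
      if w == "NATURAL" then acc  -- Python: IndexError on values_parsed[i+1]
      else if w == "JOIN" || w == "," then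
        extract_FROM_loop []
          ((if element == "" then acc else acc ++ [PySem.Str.strip element]) ++ [w]) ""
      else
        extract_FROM_loop [] acc (element ++ " " ++ w)
  | w :: nxt :: rest, acc, element =>
      if w == "NATURAL" && nxt == "JOIN" then
        extract_FROM_loop rest
          ((if element == "" then acc else acc ++ [PySem.Str.strip element]) ++ ["NATURAL JOIN"]) ""
      else if w == "JOIN" || w == "," then
        extract_FROM_loop (nxt :: rest)
          ((if element == "" then acc else acc ++ [PySem.Str.strip element]) ++ [w]) ""
      else
        extract_FROM_loop (nxt :: rest) acc (element ++ " " ++ w)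

def extract_FROM (values : String) : List String :=
  extract_FROM_loop (PySem.Str.split₀ values) [] ""

-- ===== PORT B =====
-- pass 1 of Source B: fuse NATURAL + JOIN into the single token "NATURAL JOIN"
def extract_FROM_normalize : List String → List String
  | [] => []
  | [w] => [w]
  | w :: nxt :: rest =>
      if w == "NATURAL" && nxt == "JOIN" then "NATURAL JOIN" :: extract_FROM_normalize rest
      else w :: extract_FROM_normalize (nxt :: rest)

-- pass 2 of Source B: split the token stream on delimiter tokens
def extract_FROM_split : List String → List String → List String → List String
  | [], result, current =>
      if current.isEmpty then result else result ++ [PySem.Str.join " " current]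
  | t :: rest, result, current =>
      if t == "JOIN" || t == "," || t == "NATURAL JOIN" then
        extract_FROM_split rest
          ((if current.isEmpty then result else result ++ [PySem.Str.join " " current]) ++ [t]) []
      else
        extract_FROM_split rest result (current ++ [t])

def extract_FROM_alt (values : String) : List String :=
  extract_FROM_split (extract_FROM_normalize (PySem.Str.split₀ values)) [] []

-- ===== PRECONDITION & SPEC =====
-- Pre_ excludes exactly the inputs whose last whitespace-split word is "NATURAL",
-- on which A raises IndexError (values_parsed[i+1] past the end).
def Pre_extract_FROM (values : String) : Prop :=
  (PySem.Str.split₀ values).getLast? ≠ some "NATURAL"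
instance (values : String) : Decidable (Pre_extract_FROM values) := by
  unfold Pre_extract_FROM; infer_instance

def pvWitness_extract_FROM : String := "t1 NATURAL JOIN t2 , t3"

def Spec_extract_FROM (values : String) (out : List String) : Prop := out = extract_FROM_alt values
instance (values : String) (out : List String) : Decidable (Spec_extract_FROM values out) := by unfold Spec_extract_FROM; infer_instance

-- ===== CLAIM (what is proved, stated in full; the proofs are below) =====
def Claim_equal_extract_FROM : Prop := ∀ (values : String), Dom_extract_FROM values → Pre_extract_FROM values → Spec_extract_FROM values (extract_FROM values)


-- ===== LEMMAS AND PROOFS =====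

theorem pv_intercalate_singleton (sep x : List Char) : sep.intercalate [x] = x := by
  simp [List.intercalate]

theorem pv_intercalate_cons_cons (sep x y : List Char) (zs : List (List Char)) :
    sep.intercalate (x :: y :: zs) = x ++ sep ++ sep.intercalate (y :: zs) := by
  simp [List.intercalate, List.intersperse]

-- a word is "ok" when it is nonempty and contains no whitespace character
def pvOk (w : String) : Prop :=
  w.toList ≠ [] ∧ ∀ c ∈ w.toList, PySem.Chars.isspace c = false

-- the character list A's accumulated `element` holds when B's `current` is `cur`
def pvBlob (cur : List String) : List Char :=
  cur.flatMap (fun w => ' ' :: w.toList)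

theorem pv_split₀_go_ok (s cur : List Char) (acc : List (List Char))
    (hc : ∀ c ∈ cur, PySem.Chars.isspace c = false)
    (ha : ∀ w ∈ acc, w ≠ [] ∧ ∀ c ∈ w, PySem.Chars.isspace c = false) :
    ∀ w ∈ PySem.Chars.split₀.go s cur acc, w ≠ [] ∧ ∀ c ∈ w, PySem.Chars.isspace c = false := by
  induction s generalizing cur acc with
  | nil =>
      simp only [PySem.Chars.split₀.go]
      split_ifs with h
      · simpa using ha
      · intro w hw
        simp only [List.mem_reverse, List.mem_cons] at hw
        rcases hw with h1 | h1
        · subst h1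
          constructor
          · simpa using (by simpa [List.isEmpty_iff] using h)
          · intro c hc'; exact hc c (by simpa using hc')
        · exact ha w h1
  | cons c rest ih =>
      simp only [PySem.Chars.split₀.go]
      split_ifs with h1 h2
      · exact ih [] acc (by simp) ha
      · refine ih [] (cur.reverse :: acc) (by simp) ?_
        intro w hw
        rcases List.mem_cons.mp hw with h | h
        · subst h
          refine ⟨by simpa using (by simpa [List.isEmpty_iff] using h2), ?_⟩
          intro x hx; exact hc x (by simpa using hx)
        · exact ha w h
      · refine ih (c :: cur) acc ?_ ha
        intro x hx
        rcases List.mem_cons.mp hx with h | h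
        · subst h; simpa using h1
        · exact hc x h

theorem pv_split₀_ok (values : String) :
    ∀ w ∈ PySem.Str.split₀ values, pvOk w := by
  intro w hw
  have h := pv_split₀_go_ok values.toList [] [] (by simp) (by simp) w.toList
  have hmem : w.toList ∈ PySem.Chars.split₀ values.toList := by
    rw [← PySem.Str.split₀_map_toList]
    exact List.mem_map_of_mem hw
  exact h (by simpa [PySem.Chars.split₀] using hmem)

-- stripping a leading space off a string with non-space first and last characters
theorem pv_strip_space_cons (x : List Char)
    (h1 : ∃ c t, x = c :: t ∧ PySem.Chars.isspace c = false)
    (h2 : ∃ c t, x.reverse = c :: t ∧ PySem.Chars.isspace c = false) :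
    PySem.Chars.strip (' ' :: x) = x := by
  obtain ⟨c, t, hx, hc⟩ := h1
  obtain ⟨d, u, hr, hd⟩ := h2
  unfold PySem.Chars.strip PySem.Chars.lstrip PySem.Chars.rstrip
  have hsp : PySem.Chars.isspace ' ' = true := by decide
  rw [List.dropWhile_cons_of_pos (by simp [hsp])]
  rw [hx, List.dropWhile_cons_of_neg (by simp [hc]), ← hx]
  rw [hr, List.dropWhile_cons_of_neg (by simp [hd]), ← hr, List.reverse_reverse]

theorem pv_blob_eq (cur : List String) (h : cur ≠ []) :
    pvBlob cur = ' ' :: PySem.Chars.join [' '] (cur.map String.toList) := by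
  induction cur with
  | nil => exact absurd rfl h
  | cons w ws ih =>
      cases ws with
      | nil => simp [pvBlob, PySem.Chars.join, pv_intercalate_singleton]
      | cons v vs =>
          simp only [pvBlob, List.flatMap_cons, List.map_cons, PySem.Chars.join,
            pv_intercalate_cons_cons] at *
          have := ih (by simp)
          simp only [pvBlob, List.flatMap_cons] at this
          simp [this]

theorem pv_join_head (parts : List (List Char)) (hne : parts ≠ [])
    (h : ∀ p ∈ parts, p ≠ [] ∧ ∀ c ∈ p, PySem.Chars.isspace c = false) :
    ∃ c t, PySem.Chars.join [' '] parts = c :: t ∧ PySem.Chars.isspace c = false := by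
  cases parts with
  | nil => exact absurd rfl hne
  | cons p ps =>
      obtain ⟨hp, hcs⟩ := h p (by simp)
      cases hpc : p with
      | nil => exact absurd hpc hp
      | cons c t =>
          cases ps with
          | nil =>
              exact ⟨c, t, by simp [PySem.Chars.join, pv_intercalate_singleton, hpc], hcs c (by simp [hpc])⟩
          | cons q qs =>
              refine ⟨c, t ++ ' ' :: PySem.Chars.join [' '] (q :: qs), ?_, hcs c (by simp [hpc])⟩
              simp [PySem.Chars.join, pv_intercalate_cons_cons, hpc]

theorem pv_join_last (parts : List (List Char)) (hne : parts ≠ [])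
    (h : ∀ p ∈ parts, p ≠ [] ∧ ∀ c ∈ p, PySem.Chars.isspace c = false) :
    ∃ c t, (PySem.Chars.join [' '] parts).reverse = c :: t ∧ PySem.Chars.isspace c = false := by
  induction parts with
  | nil => exact absurd rfl hne
  | cons p ps ih =>
      cases ps with
      | nil =>
          obtain ⟨hp, hcs⟩ := h p (by simp)
          cases hpc : p.reverse with
          | nil => exact absurd (by simpa using hpc) hp
          | cons c t =>
              refine ⟨c, t, by simp [PySem.Chars.join, pv_intercalate_singleton, hpc], ?_⟩
              exact hcs c (by rw [← List.mem_reverse]; simp [hpc])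
      | cons q qs =>
          obtain ⟨c, t, hct, hc⟩ := ih (by simp) (fun p hp => h p (by simp [hp]))
          refine ⟨c, t ++ (' ' :: p.reverse), ?_, hc⟩
          simp only [PySem.Chars.join] at hct ⊢
          rw [pv_intercalate_cons_cons]
          simp [List.reverse_append, hct]

-- A's flushed element equals B's flushed current when the invariant holds
theorem pv_flush_eq (el : String) (cur : List String) (hcur : cur ≠ [])
    (hok : ∀ w ∈ cur, pvOk w) (hel : el.toList = pvBlob cur) :
    PySem.Str.strip el = PySem.Str.join " " cur := by
  apply String.toList_inj.mp
  rw [PySem.Str.toList_strip, PySem.Str.toList_join, hel, pv_blob_eq cur hcur]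
  have hparts : ∀ p ∈ cur.map String.toList, p ≠ [] ∧ ∀ c ∈ p, PySem.Chars.isspace c = false := by
    intro p hp
    obtain ⟨w, hw, rfl⟩ := List.mem_map.mp hp
    exact (hok w hw)
  have hne : cur.map String.toList ≠ [] := by simpa using hcur
  have : " ".toList = [' '] := rfl
  rw [this]
  exact pv_strip_space_cons _ (pv_join_head _ hne hparts) (pv_join_last _ hne hparts)

theorem pv_el_empty_iff (el : String) (cur : List String) (hel : el.toList = pvBlob cur) :
    (el == "") = cur.isEmpty := by
  cases cur with
  | nil =>
      have : el = "" := String.toList_inj.mp (by simpa [pvBlob] using hel)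
      simp [this]
  | cons w ws =>
      have : el.toList ≠ [] := by simp [hel, pvBlob]
      have hne : el ≠ "" := fun h => this (by simp [h])
      simp [hne]

theorem pv_not_nj (w : String) (hok : pvOk w) : (w == "NATURAL JOIN") = false := by
  apply beq_eq_false_iff_ne.mpr
  intro hw
  have := hok.2 ' ' (by rw [hw]; decide)
  exact absurd this (by decide)

theorem pv_step_el (el w : String) (cur : List String) (hel : el.toList = pvBlob cur) :
    (el ++ " " ++ w).toList = pvBlob (cur ++ [w]) := by
  simp [String.toList_append, hel, pvBlob]

theorem pv_flushif (el : String) (cur acc : List String)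
    (hokc : ∀ w ∈ cur, pvOk w) (hel : el.toList = pvBlob cur) :
    (if el == "" then acc else acc ++ [PySem.Str.strip el]) =
      (if cur.isEmpty then acc else acc ++ [PySem.Str.join " " cur]) := by
  rw [pv_el_empty_iff el cur hel]
  cases hc : cur.isEmpty with
  | false =>
      simp only [Bool.false_eq_true, if_false]
      rw [pv_flush_eq el cur (by simpa [List.isEmpty_iff] using hc) hokc hel]
  | true => simp

theorem pv_main : ∀ (n : Nat) (ws : List String), ws.length ≤ n →
    ∀ (acc : List String) (el : String) (cur : List String),
    (∀ w ∈ ws, pvOk w) → (∀ w ∈ cur, pvOk w) → el.toList = pvBlob cur →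
    ws.getLast? ≠ some "NATURAL" →
    extract_FROM_loop ws acc el = extract_FROM_split (extract_FROM_normalize ws) acc cur := by
  intro n
  induction n with
  | zero =>
      intro ws hlen acc el cur _ hokc hel _
      have hws : ws = [] := List.length_eq_zero_iff.mp (Nat.le_zero.mp hlen)
      subst hws
      simp only [extract_FROM_loop, extract_FROM_normalize, extract_FROM_split]
      rw [pv_flushif el cur acc hokc hel]
  | succ m ih =>
      intro ws hlen acc el cur hokw hokc hel hlast
      match ws with
      | [] =>
          exact ih [] (by simp) acc el cur hokw hokc hel hlast
      | [w] =>
          have hwn : (w == "NATURAL") = false := by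
            apply beq_eq_false_iff_ne.mpr
            intro h
            exact hlast (by simp [h])
          have hnj := pv_not_nj w (hokw w (by simp))
          have hok' : ∀ v ∈ cur ++ [w], pvOk v := by
            intro v hv
            rcases List.mem_append.mp hv with h | h
            · exact hokc v h
            · have hvw : v = w := by simpa using h
              rw [hvw]; exact hokw w (by simp)
          have hel' := pv_step_el el w cur hel
          simp only [extract_FROM_loop, extract_FROM_normalize, extract_FROM_split, hwn,
            Bool.false_eq_true, if_false, beq_self_eq_true, if_true]
          rw [pv_flushif el cur acc hokc hel, pv_flushif (el ++ " " ++ w) (cur ++ [w]) acc hok' hel']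
          by_cases hd : (w == "JOIN" || w == ",") = true
          · have hd3 : (w == "JOIN" || w == "," || w == "NATURAL JOIN") = true := by
              simp only [Bool.or_eq_true] at hd ⊢; tauto
            rw [if_pos hd, if_pos hd3]
            simp
          · have hd3 : ¬ (w == "JOIN" || w == "," || w == "NATURAL JOIN") = true := by
              simp only [Bool.or_eq_true, hnj] at hd ⊢; tauto
            rw [if_neg hd, if_neg hd3]
      | w :: nxt :: rest =>
          have hlen' : (nxt :: rest).length ≤ m := by simpa using hlen
          have hlast' : (nxt :: rest).getLast? ≠ some "NATURAL" := by
            rwa [List.getLast?_cons_cons] at hlast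
          simp only [extract_FROM_loop, extract_FROM_normalize]
          by_cases hf : (w == "NATURAL" && nxt == "JOIN") = true
          · rw [if_pos hf, if_pos hf]
            simp only [extract_FROM_split]
            rw [pv_flushif el cur acc hokc hel]
            rw [if_pos (show (("NATURAL JOIN" : String) == "JOIN" || ("NATURAL JOIN" : String) == ","
              || ("NATURAL JOIN" : String) == "NATURAL JOIN") = true by decide)]
            refine ih rest (by simp at hlen; omega) _ "" [] (fun v hv => hokw v (by simp [hv]))
              (by simp) (by simp [pvBlob]) ?_
            cases rest with
            | nil => simp
            | cons r rs => rwa [List.getLast?_cons_cons] at hlast'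
          · rw [if_neg hf, if_neg hf]
            have hnj := pv_not_nj w (hokw w (by simp))
            simp only [extract_FROM_split]
            by_cases hd : (w == "JOIN" || w == ",") = true
            · have hd3 : (w == "JOIN" || w == "," || w == "NATURAL JOIN") = true := by
                simp only [Bool.or_eq_true] at hd ⊢; tauto
              rw [if_pos hd, if_pos hd3]
              rw [pv_flushif el cur acc hokc hel]
              exact ih (nxt :: rest) hlen' _ "" [] (fun v hv => hokw v (by simp [hv]))
                (by simp) (by simp [pvBlob]) hlast'
            · have hd3 : ¬ (w == "JOIN" || w == "," || w == "NATURAL JOIN") = true := by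
                simp only [Bool.or_eq_true, hnj] at hd ⊢; tauto
              rw [if_neg hd, if_neg hd3]
              refine ih (nxt :: rest) hlen' acc (el ++ " " ++ w) (cur ++ [w])
                (fun v hv => hokw v (by simp [hv])) ?_ (pv_step_el el w cur hel) hlast'
              intro v hv
              rcases List.mem_append.mp hv with h | h
              · exact hokc v h
              · have hvw : v = w := by simpa using h
                rw [hvw]; exact hokw w (by simp)

-- ===== VERDICT (by name: the statement is the Claim_ definition above) =====
theorem extract_FROM_spec : Claim_equal_extract_FROM := by
  intro values _hdom hpre
  unfold Spec_extract_FROM extract_FROM extract_FROM_alt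
  exact pv_main (PySem.Str.split₀ values).length _ (le_refl _) [] "" []
    (pv_split₀_ok values) (by simp) (by simp [pvBlob]) hpre
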